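-- pv_equiv track=rewrite | github.com/Nikman800/Leetcode_Solutions | countBalancedSubarrays2.py | count_balanced_subarrays
-- ===== SOURCE A (Python) =====
-- def count_balanced_subarrays(arr):
--     from collections import defaultdict
--     # Dictionary to count prefix states.
--     # The state is (even_parity, odd_parity)
--     prefix_count = defaultdict(int)
--     # Initialize with the empty prefix state (0 evens, 0 odds)
--     prefix_count[(0, 0)] = 1
--
--     even_parity = 0  # parity of even count so far (0 means even count)
--     odd_parity = 0   # parity of odd count so far (0 means even count)
--     result = 0
--
--     for num in arr:
--         if num % 2 == 0:
--             even_parity ^= 1  # Flip even parity bit if even number found.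
--         else:
--             odd_parity ^= 1   # Flip odd parity bit if odd number found.
--
--         # Current state after including num.
--         current_state = (even_parity, odd_parity)
--         # To have a balanced subarray ending at current index,
--         # the prefix state before the subarray must have:
--         #   same even parity, and opposite odd parity.
--         target_state = (even_parity, 1 - odd_parity)
--         result += prefix_count[target_state]
--
--         # Record the current state for future subarrays.
--         prefix_count[current_state] += 1
--
--     return result
-- ===== SOURCE B (Python) =====
-- def count_balanced_subarrays(arr):
--     # Build a histogram of prefix parity states in one pass, then combine
--     # the four state counts with a closed-form product (no per-step lookup).
--     e = o = 0
--     c00, c01, c10, c11 = 1, 0, 0, 0  # empty prefix has state (0, 0)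
--     for num in arr:
--         if num % 2 == 0:
--             e ^= 1
--         else:
--             o ^= 1
--         if e == 0:
--             if o == 0:
--                 c00 += 1
--             else:
--                 c01 += 1
--         else:
--             if o == 0:
--                 c10 += 1
--             else:
--                 c11 += 1
--     return c00 * c01 + c10 * c11
-- ===== Notes on version B (the rewrite author's own statement) =====
-- stated objective: faster
-- what changed: B replaces the online defaultdict lookup-and-accumulate with a single pass tallying the four prefix parity states into plain integer counters and returns the closed-form combination c00*c01 + c10*c11 after the loop (no tuple-key hashing per element).
import Mathlib
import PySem

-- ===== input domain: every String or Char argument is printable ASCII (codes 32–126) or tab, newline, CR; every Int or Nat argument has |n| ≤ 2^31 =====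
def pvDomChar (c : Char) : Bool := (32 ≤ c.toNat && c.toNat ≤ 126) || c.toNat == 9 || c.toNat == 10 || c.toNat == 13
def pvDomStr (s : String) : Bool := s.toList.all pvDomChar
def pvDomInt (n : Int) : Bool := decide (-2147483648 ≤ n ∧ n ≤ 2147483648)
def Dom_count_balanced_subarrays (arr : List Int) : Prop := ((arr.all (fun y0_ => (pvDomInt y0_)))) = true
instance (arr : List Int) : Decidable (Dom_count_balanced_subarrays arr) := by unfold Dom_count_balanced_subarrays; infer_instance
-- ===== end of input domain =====

-- B tallies the four prefix parity states into counters and combines them in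
-- closed form after the loop (simpler; A keeps a dict and accumulates online).

-- ===== PORT A =====
-- defaultdict reads are modeled by getD _ 0: the key silently inserted with
-- default 0 by defaultdict.__getitem__ is only ever read back via getD _ 0,
-- so the result is exact.
def pvALoop : List Int → PySem.Dict (Int × Int) Int → Int → Int → Int → Int
  | [], _, _, _, result => result
  | num :: rest, d, even_parity, odd_parity, result =>
    let even_parity' := if PySem.Int.mod num 2 = 0 then PySem.Int.bxor even_parity 1 else even_parity
    let odd_parity' := if PySem.Int.mod num 2 = 0 then odd_parity else PySem.Int.bxor odd_parity 1
    let current_state := (even_parity', odd_parity')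
    let target_state := (even_parity', 1 - odd_parity')
    let result' := result + d.getD target_state 0
    let d' := d.insert current_state (d.getD current_state 0 + 1)
    pvALoop rest d' even_parity' odd_parity' result'

def count_balanced_subarrays (arr : List Int) : Int :=
  pvALoop arr (PySem.Dict.empty.insert (0, 0) 1) 0 0 0

-- ===== PORT B =====
def pvBLoop : List Int → Int → Int → Int → Int → Int → Int → Int × Int × Int × Int
  | [], _, _, c00, c01, c10, c11 => (c00, c01, c10, c11)
  | num :: rest, e, o, c00, c01, c10, c11 =>
    let e' := if PySem.Int.mod num 2 = 0 then PySem.Int.bxor e 1 else e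
    let o' := if PySem.Int.mod num 2 = 0 then o else PySem.Int.bxor o 1
    if e' = 0 then
      if o' = 0 then pvBLoop rest e' o' (c00 + 1) c01 c10 c11
      else pvBLoop rest e' o' c00 (c01 + 1) c10 c11
    else
      if o' = 0 then pvBLoop rest e' o' c00 c01 (c10 + 1) c11
      else pvBLoop rest e' o' c00 c01 c10 (c11 + 1)

def count_balanced_subarrays_alt (arr : List Int) : Int :=
  let (c00, c01, c10, c11) := pvBLoop arr 0 0 1 0 0 0
  c00 * c01 + c10 * c11

-- ===== PRECONDITION & SPEC =====
def Spec_count_balanced_subarrays (arr : List Int) (out : Int) : Prop := out = count_balanced_subarrays_alt arr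
instance (arr : List Int) (out : Int) : Decidable (Spec_count_balanced_subarrays arr out) := by unfold Spec_count_balanced_subarrays; infer_instance

-- ===== CLAIM (what is proved, stated in full; the proofs are below) =====
def Claim_equal_count_balanced_subarrays : Prop := ∀ (arr : List Int), Dom_count_balanced_subarrays arr → Spec_count_balanced_subarrays arr (count_balanced_subarrays arr)

-- ===== LEMMAS AND PROOFS =====

lemma pv_loop_inv : ∀ (l : List Int) (d : PySem.Dict (Int × Int) Int)
    (e o c00 c01 c10 c11 result : Int),
    (e = 0 ∨ e = 1) → (o = 0 ∨ o = 1) →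
    d.getD (0, 0) 0 = c00 → d.getD (0, 1) 0 = c01 →
    d.getD (1, 0) 0 = c10 → d.getD (1, 1) 0 = c11 →
    result = c00 * c01 + c10 * c11 →
    pvALoop l d e o result =
      (fun (p : Int × Int × Int × Int) => p.1 * p.2.1 + p.2.2.1 * p.2.2.2)
        (pvBLoop l e o c00 c01 c10 c11) := by
  intro l
  induction l with
  | nil =>
    intro d e o c00 c01 c10 c11 result _ _ h00 h01 h10 h11 hr
    simp [pvALoop, pvBLoop, hr]
  | cons num rest ih =>
    intro d e o c00 c01 c10 c11 result he ho h00 h01 h10 h11 hr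
    by_cases hm : PySem.Int.mod num 2 = 0 <;>
      rcases he with he | he <;> rcases ho with ho | ho <;>
      subst he ho <;>
      simp only [pvALoop, pvBLoop, hm, if_false, if_pos] <;>
      norm_num [PySem.Int.bxor] <;>
      · rw [ih] <;>
        simp [PySem.Dict.getD_insert, h00, h01, h10, h11, hr] <;> ring

-- ===== VERDICT (by name: the statement is the Claim_ definition above) =====
theorem count_balanced_subarrays_spec : Claim_equal_count_balanced_subarrays := by
  intro arr _
  unfold Spec_count_balanced_subarrays count_balanced_subarrays count_balanced_subarrays_alt
  rw [pv_loop_inv arr _ 0 0 1 0 0 0 0 (Or.inl rfl) (Or.inl rfl)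
      (by decide) (by decide) (by decide) (by decide) (by decide)]
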